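-- pv_equiv track=rewrite | github.com/fennelLabs/fennel-service-api | main/secret_key_utils.py | convert_word_to_integer
-- ===== SOURCE A (Python) =====
-- def convert_word_to_integer(mnemonic: str) -> int:
--     mnemonic_integers = [ord(word) for word in list(mnemonic)]
--     mnemonic_strings = [str(integer) for integer in mnemonic_integers]
--     padded_mnemonic_strings = [
--         "0" * (3 - len(string)) + string for string in mnemonic_strings
--     ]
--     padded_mnemonic_strings.insert(0, "1")
--     return int("".join(padded_mnemonic_strings))
-- ===== SOURCE B (Python) =====
-- def convert_word_to_integer(mnemonic: str) -> int:
--     result = 1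
--     for character in mnemonic:
--         o = ord(character)
--         width = max(3, len(str(o)))
--         result = result * 10 ** width + o
--     return result
-- ===== Notes on version B (the rewrite author's own statement) =====
-- stated objective: simpler
-- what changed: B computes the result purely arithmetically in one fold (result = result * 10**blockwidth + ord(c)) instead of building per-character zero-padded strings, joining them and re-parsing the join with int().
import Mathlib
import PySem

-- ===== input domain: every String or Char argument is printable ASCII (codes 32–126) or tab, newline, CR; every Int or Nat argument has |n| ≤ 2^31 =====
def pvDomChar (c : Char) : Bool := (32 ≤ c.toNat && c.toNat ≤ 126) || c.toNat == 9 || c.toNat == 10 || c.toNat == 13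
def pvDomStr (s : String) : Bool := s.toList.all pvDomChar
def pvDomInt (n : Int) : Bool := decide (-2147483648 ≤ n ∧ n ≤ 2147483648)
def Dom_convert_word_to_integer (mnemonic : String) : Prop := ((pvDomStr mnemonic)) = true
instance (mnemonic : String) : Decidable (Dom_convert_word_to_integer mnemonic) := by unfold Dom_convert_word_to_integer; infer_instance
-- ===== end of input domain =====

-- B replaces A's build-pad-join-then-int() string pipeline by a single arithmetic fold
-- (result := result * 10^blockwidth + ord c), same value; objective: simpler.

-- ===== PORT A =====
-- Literal port of A. Strings are modeled by their code-point lists (PySem.Chars);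
-- "0" * (3 - len(string)) is List.replicate (3 - length) '0' (Nat subtraction clamps at 0
-- exactly as Python's negative string repetition gives "");  .insert(0, "1") is
-- PySem.List.insert at 0;  "".join is PySem.Chars.join [];  int(...) is PySem.Int.ofChars?,
-- which is always `some` here (nonempty all-digit string), so .getD 0 is never the default.
def convert_word_to_integer (mnemonic : String) : Int :=
  let mnemonic_integers : List Int := mnemonic.toList.map (fun word => (word.toNat : Int))
  let mnemonic_strings : List (List Char) := mnemonic_integers.map (fun integer => PySem.Int.toChars integer)
  let padded_mnemonic_strings : List (List Char) :=
    mnemonic_strings.map (fun string => List.replicate (3 - string.length) '0' ++ string)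
  let padded_mnemonic_strings' : List (List Char) := PySem.List.insert padded_mnemonic_strings 0 ['1']
  (PySem.Int.ofChars? (PySem.Chars.join [] padded_mnemonic_strings')).getD 0

-- ===== PORT B =====
-- Literal port of Source B: one fold, result = result * 10 ** max(3, len(str(ord(c)))) + ord(c).
def convert_word_to_integer_alt (mnemonic : String) : Int :=
  mnemonic.toList.foldl
    (fun result character =>
      let o : Int := (character.toNat : Int)
      let width : Nat := max 3 (PySem.Int.toChars o).length
      result * 10 ^ width + o) 1

-- ===== PRECONDITION & SPEC =====
def Spec_convert_word_to_integer (mnemonic : String) (out : Int) : Prop := out = convert_word_to_integer_alt mnemonic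
instance (mnemonic : String) (out : Int) : Decidable (Spec_convert_word_to_integer mnemonic out) := by unfold Spec_convert_word_to_integer; infer_instance

-- ===== CLAIM (what is proved, stated in full; the proofs are below) =====
def Claim_equal_convert_word_to_integer : Prop := ∀ (mnemonic : String), Dom_convert_word_to_integer mnemonic → Spec_convert_word_to_integer mnemonic (convert_word_to_integer mnemonic)

-- ===== LEMMAS AND PROOFS =====

def myGo : List Char → Bool → Nat → Option Nat
  | [], a, acc => if a then some acc else none
  | c :: rest, a, acc =>
    if c.isDigit then myGo rest true (acc * 10 + (c.toNat - '0'.toNat))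
    else if c = '_' ∧ a then
      match rest with
      | d :: _ => if d.isDigit then myGo rest false acc else none
      | [] => none
    else none

def myDigitsValG (g : List Char → Bool → Nat → Option Nat) : List Char → Option Nat
  | [] => none
  | cs => g cs false 0

def myOfCharsG (g : List Char → Bool → Nat → Option Nat) (s : List Char) : Option Int :=
  have cs := (List.dropWhile PySem.Int.isIntSpace (List.dropWhile PySem.Int.isIntSpace s).reverse).reverse
  match cs with
  | '-' :: ds => Option.map (fun n => -n) (do let a ← myDigitsValG g ds; pure (↑a : Int))
  | '+' :: ds => Option.map (fun n => n) (do let a ← myDigitsValG g ds; pure (↑a : Int))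
  | ds => Option.map (fun n => n) (do let a ← myDigitsValG g ds; pure (↑a : Int))

theorem ofChars_cloak : ∃ g : List Char → Bool → Nat → Option Nat,
    PySem.Int.ofChars? = myOfCharsG g ∧
    (∀ b n, g [] b n = (if b then some n else none)) ∧
    (∀ c l b n, g (c :: l) b n =
      (if c.isDigit then g l true (n * 10 + (c.toNat - '0'.toNat))
       else if c = '_' ∧ b then
         (match l with
          | d :: _ => if d.isDigit then g l false n else none
          | [] => none)
       else none)) := by
  exact ⟨_, by with_unfolding_all rfl,
           fun b n => by with_unfolding_all rfl,
           fun c l b n => by with_unfolding_all rfl⟩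

theorem ofChars?_eq_pub : PySem.Int.ofChars? = myOfCharsG myGo := by
  obtain ⟨g, he, h0, h1⟩ := ofChars_cloak
  have hg : ∀ l b n, g l b n = myGo l b n := by
    intro l
    induction l with
    | nil => intro b n; rw [h0]; cases b <;> simp [myGo]
    | cons c l ih =>
      intro b n
      rw [h1]
      by_cases hd : c.isDigit
      · simp [myGo, hd, ih]
      · cases l with
        | nil => simp [myGo, hd]
        | cons d t =>
          by_cases hu : c = '_' ∧ b = true
          · simp [myGo, hu, ih]
          · simp [myGo, hd, hu]
  have hdv : myDigitsValG g = myDigitsValG myGo := by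
    funext l
    cases l with
    | nil => simp [myDigitsValG]
    | cons c t => simp [myDigitsValG, hg]
  rw [he]
  funext s
  simp only [myOfCharsG, hdv]

theorem myGo_val (l : List Char) (h : ∀ c ∈ l, c.isDigit = true) (acc : Nat) :
    myGo l true acc = some (l.foldl (fun a c => a * 10 + (c.toNat - 48)) acc) := by
  induction l generalizing acc with
  | nil => simp [myGo]
  | cons c t ih =>
    have hc : c.isDigit = true := h c (by simp)
    have ht : ∀ d ∈ t, d.isDigit = true := fun d hd => h d (by simp [hd])
    simp [myGo, hc, ih ht]

-- generic base-10 accumulator decomposition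
theorem foldl_digit_acc (l : List Char) (a : Nat) :
    l.foldl (fun a c => a * 10 + (c.toNat - 48)) a
      = a * 10 ^ l.length + l.foldl (fun a c => a * 10 + (c.toNat - 48)) 0 := by
  induction l generalizing a with
  | nil => simp
  | cons c t ih =>
    simp only [List.foldl_cons, List.length_cons]
    rw [ih (a * 10 + (c.toNat - 48)), ih (0 * 10 + (c.toNat - 48))]
    ring

def blockOfN (n : Nat) : List Char :=
  List.replicate (3 - (PySem.Int.toChars (n : Int)).length) '0' ++ PySem.Int.toChars (n : Int)

-- per-character facts, finite check over the domain's ordinals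
def blockCheck (n : Nat) : Bool :=
  !(9 ≤ n) || ((blockOfN n).all Char.isDigit && (blockOfN n).length == 3
    && ((blockOfN n).foldl (fun a c => a * 10 + (c.toNat - 48)) 0 == n)
    && (max 3 (PySem.Int.toChars (n : Int)).length == 3))

theorem block_facts_bool : (List.range 127).all blockCheck = true := by decide

theorem block_facts : ∀ n < 127, 9 ≤ n →
    ((∀ d ∈ blockOfN n, d.isDigit = true)
      ∧ (blockOfN n).length = 3
      ∧ (blockOfN n).foldl (fun a c => a * 10 + (c.toNat - 48)) 0 = n
      ∧ max 3 (PySem.Int.toChars (n : Int)).length = 3) := by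
  intro n hn h9
  have := List.all_eq_true.mp block_facts_bool n (List.mem_range.mpr hn)
  simp only [blockCheck, Bool.or_eq_true, Bool.not_eq_true', decide_eq_false_iff_not,
    Bool.and_eq_true, beq_iff_eq, List.all_eq_true] at this
  rcases this with h | ⟨⟨⟨hd, hl⟩, hv⟩, hw⟩
  · omega
  · exact ⟨hd, hl, hv, hw⟩

theorem digit_not_space (c : Char) (h : c.isDigit = true) : PySem.Int.isIntSpace c = false := by
  simp only [PySem.Int.isIntSpace, Bool.or_eq_false_iff, decide_eq_false_iff_not]
  refine ⟨⟨⟨⟨⟨?_, ?_⟩, ?_⟩, ?_⟩, ?_⟩, ?_⟩ <;> rintro rfl <;> simp [Char.isDigit] at h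

theorem dropWhile_no_space (l : List Char) (h : ∀ c ∈ l, c.isDigit = true) :
    l.dropWhile PySem.Int.isIntSpace = l := by
  cases l with
  | nil => simp
  | cons c t => simp [List.dropWhile, digit_not_space c (h c (by simp))]

theorem join_nil_eq_flatten (parts : List (List Char)) :
    PySem.Chars.join [] parts = parts.flatten := by
  simp [PySem.Chars.join, List.intercalate]
  induction parts with
  | nil => simp
  | cons p ps ih => cases ps <;> simp_all [List.intersperse]

theorem fold_blocks (cs : List Char) (h : ∀ c ∈ cs, 9 ≤ c.toNat ∧ c.toNat < 127) (a : Nat) :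
    ((cs.map (fun c => blockOfN c.toNat)).flatten).foldl (fun a c => a * 10 + (c.toNat - 48)) a
      = cs.foldl (fun a c => a * 1000 + c.toNat) a := by
  induction cs generalizing a with
  | nil => simp
  | cons c t ih =>
    have hc := h c (by simp)
    obtain ⟨hd, hl, hv, -⟩ := block_facts c.toNat hc.2 hc.1
    have ht : ∀ d ∈ t, 9 ≤ d.toNat ∧ d.toNat < 127 := fun d hdm => h d (by simp [hdm])
    simp only [List.map_cons, List.flatten_cons, List.foldl_append, List.foldl_cons]
    rw [foldl_digit_acc (blockOfN c.toNat) a, hl, hv, ih ht]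
    norm_num

theorem alt_fold (cs : List Char) (h : ∀ c ∈ cs, 9 ≤ c.toNat ∧ c.toNat < 127) (a : Nat) :
    cs.foldl (fun result character =>
        let o : Int := (character.toNat : Int)
        let width : Nat := max 3 (PySem.Int.toChars o).length
        result * 10 ^ width + o) (a : Int)
      = ((cs.foldl (fun a c => a * 1000 + c.toNat) a : Nat) : Int) := by
  induction cs generalizing a with
  | nil => simp
  | cons c t ih =>
    have hc := h c (by simp)
    obtain ⟨-, -, -, hw⟩ := block_facts c.toNat hc.2 hc.1
    have ht : ∀ d ∈ t, 9 ≤ d.toNat ∧ d.toNat < 127 := fun d hdm => h d (by simp [hdm])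
    simp only [List.foldl_cons, hw]
    have : ((a : Int) * 10 ^ 3 + (c.toNat : Int)) = ((a * 1000 + c.toNat : Nat) : Int) := by
      push_cast; ring
    rw [this, ih ht]

theorem wrapper_digits (rest : List Char) (h : ∀ c ∈ rest, c.isDigit = true) :
    myOfCharsG myGo ('1' :: rest)
      = some ((rest.foldl (fun a c => a * 10 + (c.toNat - 48)) 1 : Nat) : Int) := by
  have hall : ∀ c ∈ ('1' :: rest), c.isDigit = true := by
    intro c hc
    rcases List.mem_cons.mp hc with h1 | hm
    · subst h1; decide
    · exact h c hm
  have hs1 : List.dropWhile PySem.Int.isIntSpace ('1' :: rest) = '1' :: rest :=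
    dropWhile_no_space _ hall
  have hs2 : List.dropWhile PySem.Int.isIntSpace ('1' :: rest).reverse = ('1' :: rest).reverse :=
    dropWhile_no_space _ (by intro c hc; exact hall c (by rw [List.mem_reverse] at hc; exact hc))
  simp only [myOfCharsG, hs1, hs2, List.reverse_reverse]
  split
  · rename_i ds heq; exact absurd (List.cons.injEq .. ▸ heq) (by simp)
  · rename_i ds heq; exact absurd (List.cons.injEq .. ▸ heq) (by simp)
  · rename_i heq1 heq2
    have h1 : myDigitsValG myGo ('1' :: rest) = myGo rest true 1 := by
      show myGo ('1' :: rest) false 0 = _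
      simp only [myGo]
      rw [if_pos (by decide : '1'.isDigit = true)]
      norm_num [show '1'.toNat = 49 from rfl, show '0'.toNat = 48 from rfl]
    rw [h1, myGo_val rest h]
    rfl

theorem dom_char_bounds (m : String) (hdom : pvDomStr m = true) :
    ∀ c ∈ m.toList, 9 ≤ c.toNat ∧ c.toNat < 127 := by
  intro c hc
  have := List.all_eq_true.mp hdom c hc
  simp only [pvDomChar, Bool.or_eq_true, Bool.and_eq_true, decide_eq_true_eq, beq_iff_eq] at this
  omega

theorem main_thm (m : String) (hdom : pvDomStr m = true) :
    convert_word_to_integer m = convert_word_to_integer_alt m := by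
  have hb := dom_char_bounds m hdom
  have hdig : ∀ d ∈ (m.toList.map (fun c => blockOfN c.toNat)).flatten, d.isDigit = true := by
    intro d hd
    rcases List.mem_flatten.mp hd with ⟨blk, hblk, hdblk⟩
    rcases List.mem_map.mp hblk with ⟨c, hcm, rfl⟩
    exact (block_facts c.toNat (hb c hcm).2 (hb c hcm).1).1 d hdblk
  have hA : convert_word_to_integer m
      = (PySem.Int.ofChars? ('1' :: (m.toList.map (fun c => blockOfN c.toNat)).flatten)).getD 0 := by
    simp [convert_word_to_integer, List.map_map, Function.comp_def, PySem.List.insert_zero,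
      join_nil_eq_flatten, blockOfN]
  rw [hA, ofChars?_eq_pub, wrapper_digits _ hdig, fold_blocks m.toList hb 1]
  show ((m.toList.foldl (fun a c => a * 1000 + c.toNat) 1 : Nat) : Int) = _
  rw [convert_word_to_integer_alt]
  rw [show (1 : Int) = ((1 : Nat) : Int) from rfl, alt_fold m.toList hb 1]

-- ===== VERDICT (by name: the statement is the Claim_ definition above) =====
theorem convert_word_to_integer_spec : Claim_equal_convert_word_to_integer := by
  intro mnemonic hdom
  exact (main_thm mnemonic hdom).symm ▸ rfl
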